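-- pv_equiv track=rewrite | github.com/genropy/genro-asgi | src/genro_asgi/__main__.py | extract_staticsites
-- ===== SOURCE A (Python) =====
-- def extract_staticsites(config: dict[str, object]) -> dict[str, dict[str, object]]:
--     """
--     Extract static sites configuration from flattened config.
--
--     Flattened keys like:
--         staticsites_landing_path = "/"
--         staticsites_landing_directory = "./public"
--         staticsites_storage_path = "/storage"
--
--     Become:
--         {
--             "landing": {"path": "/", "directory": "./public"},
--             "storage": {"path": "/storage"}
--         }
--
--     Args:
--         config: Flattened configuration dict.
--
--     Returns:
--         Dict of site_name -> site_config.
--     """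
--     sites: dict[str, dict[str, object]] = {}
--
--     # Extract all staticsites_* keys
--     prefix = "staticsites_"
--     for key, value in config.items():
--         if not key.startswith(prefix):
--             continue
--
--         # Remove prefix: "staticsites_landing_path" -> "landing_path"
--         rest = key[len(prefix):]
--
--         # Split on first underscore: "landing_path" -> ("landing", "path")
--         if "_" not in rest:
--             continue
--
--         site_name, param = rest.split("_", 1)
--
--         if site_name not in sites:
--             sites[site_name] = {}
--
--         sites[site_name][param] = value
--
--     return sites
-- ===== SOURCE B (Python) =====
-- def extract_staticsites(config):
--     """Two-phase reshape: collect (site, param, value) triples, then build each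
--     site's dict in a grouped pass over the triple list."""
--     prefix = "staticsites_"
--     triples = []
--     for key, value in config.items():
--         rest = key[len(prefix):]
--         if key.startswith(prefix) and "_" in rest:
--             site, param = rest.split("_", 1)
--             triples.append((site, param, value))
--     return {s: {p: v for (t, p, v) in triples if t == s}
--             for s in dict.fromkeys(t[0] for t in triples)}
-- ===== Notes on version B (the rewrite author's own statement) =====
-- stated objective: alternative
-- what changed: Replaces the single streaming accumulate-into-nested-dict loop with a two-phase shape: one filtering pass collecting (site, param, value) triples, then a grouped pass that builds each site's inner dict by scanning the triple list per distinct site name.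
import Mathlib
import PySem

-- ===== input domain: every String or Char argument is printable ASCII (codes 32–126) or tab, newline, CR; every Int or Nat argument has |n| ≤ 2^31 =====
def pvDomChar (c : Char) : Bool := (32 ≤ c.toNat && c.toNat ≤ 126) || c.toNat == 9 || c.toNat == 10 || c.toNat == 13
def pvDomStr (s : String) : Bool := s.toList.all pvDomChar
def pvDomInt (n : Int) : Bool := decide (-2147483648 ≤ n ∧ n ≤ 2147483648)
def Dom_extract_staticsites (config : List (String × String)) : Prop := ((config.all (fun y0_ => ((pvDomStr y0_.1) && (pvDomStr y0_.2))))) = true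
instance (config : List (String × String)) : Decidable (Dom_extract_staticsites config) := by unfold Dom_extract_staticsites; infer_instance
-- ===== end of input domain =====

-- B regroups the flattened keys in two phases (collect triples, then group per site) instead of A's
-- single streaming accumulate-into-nested-dict loop; objective: alternative (same result, different shape).

-- ===== PORT A =====
-- A's loop body (one item of config.items())
def pvLoopA (sites : PySem.Dict String (PySem.Dict String String)) (kv : String × String) :
    PySem.Dict String (PySem.Dict String String) :=
  if !(PySem.Str.startswith kv.1 "staticsites_") then sites
  else
    let rest := PySem.Str.slice kv.1 (some 12) none
    if !(PySem.Str.isIn "_" rest) then sites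
    else
      let parts := (PySem.Str.splitMax? rest "_" 1).getD []
      let site_name := parts.getD 0 ""
      let param := parts.getD 1 ""
      let sites1 := if sites.contains site_name then sites
                    else sites.insert site_name PySem.Dict.empty
      sites1.insert site_name ((sites1.getD site_name PySem.Dict.empty).insert param kv.2)

def extract_staticsites (config : List (String × String)) : List (String × List (String × String)) :=
  let sites := (PySem.Dict.ofList config).items.foldl pvLoopA PySem.Dict.empty
  sites.items.map (fun p => (p.1, p.2.items))

-- ===== PORT B =====
-- B's first-pass body: collect the (site, param, value) triple of a matching item
def pvLoopB (acc : List (String × String × String)) (kv : String × String) :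
    List (String × String × String) :=
  if PySem.Str.startswith kv.1 "staticsites_" &&
     PySem.Str.isIn "_" (PySem.Str.slice kv.1 (some 12) none) then
    let parts := (PySem.Str.splitMax? (PySem.Str.slice kv.1 (some 12) none) "_" 1).getD []
    acc ++ [(parts.getD 0 "", parts.getD 1 "", kv.2)]
  else acc

def extract_staticsites_alt (config : List (String × String)) : List (String × List (String × String)) :=
  let triples := (PySem.Dict.ofList config).items.foldl pvLoopB []
  (PySem.List.dedup (triples.map (·.1))).map
    (fun s => (s, ((triples.filter (fun t => t.1 == s)).foldl
        (fun (d : PySem.Dict String String) t => d.insert t.2.1 t.2.2) PySem.Dict.empty).items))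

-- ===== PRECONDITION & SPEC =====
def Spec_extract_staticsites (config : List (String × String)) (out : List (String × List (String × String))) : Prop := out = extract_staticsites_alt config
instance (config : List (String × String)) (out : List (String × List (String × String))) : Decidable (Spec_extract_staticsites config out) := by unfold Spec_extract_staticsites; infer_instance

-- ===== CLAIM (what is proved, stated in full; the proofs are below) =====
def Claim_equal_extract_staticsites : Prop := ∀ (config : List (String × String)), Dom_extract_staticsites config → Spec_extract_staticsites config (extract_staticsites config)

-- ===== LEMMAS AND PROOFS =====

-- the per-item extraction both loop bodies share (matching key → its (site, param, value) triple)
def pvTr (kv : String × String) : Option (String × String × String) :=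
  if PySem.Str.startswith kv.1 "staticsites_" &&
     PySem.Str.isIn "_" (PySem.Str.slice kv.1 (some 12) none) then
    let parts := (PySem.Str.splitMax? (PySem.Str.slice kv.1 (some 12) none) "_" 1).getD []
    some (parts.getD 0 "", parts.getD 1 "", kv.2)
  else none

-- A's per-triple accumulation step
def pvStepA (d : PySem.Dict String (PySem.Dict String String)) (t : String × String × String) :
    PySem.Dict String (PySem.Dict String String) :=
  d.modify t.1 PySem.Dict.empty (fun inner => inner.insert t.2.1 t.2.2)

-- A's ensure-then-set on a site is exactly pvStepA
theorem pvStepA_eq (d : PySem.Dict String (PySem.Dict String String)) (s p v : String) :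
    (if d.contains s then d else d.insert s PySem.Dict.empty).insert s
      (((if d.contains s then d else d.insert s PySem.Dict.empty).getD s PySem.Dict.empty).insert p v)
    = pvStepA d (s, p, v) := by
  by_cases h : d.contains s
  · rw [if_pos h]
    simp [pvStepA, PySem.Dict.modify]
  · rw [if_neg h, PySem.Dict.getD_insert_self, PySem.Dict.insert_insert_self]
    have h0 : d.getD s PySem.Dict.empty = PySem.Dict.empty :=
      PySem.Dict.getD_of_not_contains d _ (by simpa using h)
    simp [pvStepA, PySem.Dict.modify, h0]

-- A's loop body as a match on pvTr
theorem pvBodyA (sites : PySem.Dict String (PySem.Dict String String)) (kv : String × String) :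
    pvLoopA sites kv
    = match pvTr kv with
      | none => sites
      | some t => pvStepA sites t := by
  unfold pvLoopA pvTr
  by_cases h1 : PySem.Str.startswith kv.1 "staticsites_"
  · by_cases h2 : PySem.Str.isIn "_" (PySem.Str.slice kv.1 (some 12) none)
    · simpa only [h1, h2, Bool.not_true, Bool.and_self, Bool.false_eq_true, if_false, if_true]
        using pvStepA_eq sites _ _ kv.2
    · simp at h1 h2
      simp [h1, h2]
  · simp at h1
    simp [h1]

-- B's loop body as a match on pvTr
theorem pvBodyB (acc : List (String × String × String)) (kv : String × String) :
    pvLoopB acc kv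
    = match pvTr kv with
      | none => acc
      | some t => acc ++ [t] := by
  unfold pvLoopB pvTr
  by_cases h : PySem.Str.startswith kv.1 "staticsites_" &&
      PySem.Str.isIn "_" (PySem.Str.slice kv.1 (some 12) none)
  · simp only [h, if_true]
  · simp only [h, Bool.false_eq_true, if_false]

-- A's loop over the items equals folding pvStepA over the extracted triples
theorem pvA_fold_eq (l : List (String × String)) (d : PySem.Dict String (PySem.Dict String String)) :
    l.foldl pvLoopA d = (l.filterMap pvTr).foldl pvStepA d := by
  induction l generalizing d with
  | nil => rfl
  | cons kv l ih =>
    rw [List.foldl_cons, pvBodyA, List.filterMap_cons]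
    cases htr : pvTr kv with
    | none => exact ih d
    | some t => simp only [List.foldl_cons]; exact ih _

-- B's first pass builds exactly the extracted triples
theorem pvB_triples_eq (l : List (String × String)) (acc : List (String × String × String)) :
    l.foldl pvLoopB acc = acc ++ l.filterMap pvTr := by
  induction l generalizing acc with
  | nil => simp
  | cons kv l ih =>
    rw [List.foldl_cons, pvBodyB, List.filterMap_cons]
    cases htr : pvTr kv with
    | none => exact ih acc
    | some t => rw [ih]; simp

-- lookup in the folded nested dict = inner dict built from the matching triples
theorem pvGetD_fold (ts : List (String × String × String)) (s : String)
    (d : PySem.Dict String (PySem.Dict String String)) :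
    (ts.foldl pvStepA d).getD s PySem.Dict.empty
      = (ts.filter (fun t => t.1 == s)).foldl
          (fun (inner : PySem.Dict String String) t => inner.insert t.2.1 t.2.2)
          (d.getD s PySem.Dict.empty) := by
  induction ts generalizing d with
  | nil => rfl
  | cons t ts ih =>
    rw [List.foldl_cons, List.filter_cons]
    by_cases h : t.1 = s
    · subst h
      rw [if_pos (by simp), ih, List.foldl_cons, pvStepA, PySem.Dict.getD_modify, if_pos rfl]
    · rw [if_neg (by simpa using h), ih, pvStepA, PySem.Dict.getD_modify,
        if_neg (fun e => h e.symm)]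

-- ===== VERDICT (by name: the statement is the Claim_ definition above) =====
theorem extract_staticsites_spec : Claim_equal_extract_staticsites := by
  intro config _
  unfold Spec_extract_staticsites extract_staticsites extract_staticsites_alt
  simp only [pvA_fold_eq, pvB_triples_eq, List.nil_append]
  set ts := (PySem.Dict.ofList config).items.filterMap pvTr with hts
  have hnd : ((ts.foldl pvStepA PySem.Dict.empty)).keys.Nodup := by
    unfold pvStepA
    exact PySem.Dict.nodup_keys_foldl_modify_key ts (·.1) PySem.Dict.empty
      (fun _ t inner => inner.insert t.2.1 t.2.2) PySem.Dict.empty (by simp)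
  have hkeys : (ts.foldl pvStepA PySem.Dict.empty).keys = PySem.Set.ofList (ts.map (·.1)) := by
    unfold pvStepA
    rw [PySem.Dict.keys_foldl_modify_key ts (·.1) PySem.Dict.empty
      (fun _ t inner => inner.insert t.2.1 t.2.2) PySem.Dict.empty]
    simp [PySem.Set.update_nil_left]
  rw [PySem.Dict.items_eq_map_keys _ hnd PySem.Dict.empty, hkeys,
    PySem.List.dedup_eq_ofList, List.map_map]
  refine List.map_congr_left (fun s _ => ?_)
  simp only [Function.comp_apply]
  rw [pvGetD_fold]
  simp [PySem.Dict.getD_empty]
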